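-- pv_equiv track=rewrite | github.com/OpenPecha/TibSentenceGathering | src/TibSentenceGathering/sentence_validation.py | replace_sentence_breaks_and_validate
-- ===== SOURCE A (Python) =====
-- import copy
--
-- def manhattan_distance(str1, str2):
--     """
--     Calculates the Manhattan distance between two strings.
--     Returns -1 if the strings have unequal lengths.
--     """
--     if len(str1) != len(str2):
--         return -1
--     distance = sum(c1 != c2 for c1, c2 in zip(str1, str2))
--     return distance
--
-- def replace_sentence_breaks_and_validate(data_point):
--     """
--     Processes a copy of the data point by removing spaces, replacing <sent_br> with newlines in target
--     if there's a newline at the same position in source after removing spaces.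
--     Otherwise, removes <sent_br> from target.
--     Then validates the processed source and target using Manhattan distance.
--
--     Parameters:
--         data_point (dict): A dictionary with "source" and "target" keys.
--
--     Returns:
--         bool: True if the data point is valid, False otherwise.
--     """
--     # Create a deep copy to avoid modifying the original data_point
--     data_point_copy = copy.deepcopy(data_point)
--
--     # Remove spaces from source and target
--     source_no_spaces = data_point_copy["source"].replace(" ", "")
--     target_no_spaces = data_point_copy["target"].replace(" ", "")
--
--     # Do not change the source
--     source_processed = source_no_spaces
--
--     # Initialize indices
--     src_idx = 0
--     tgt_idx = 0
--
--     # Reconstructed target after processing <sent_br>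
--     reconstructed_target = []
--
--     # Inside the while loop
--     while tgt_idx < len(target_no_spaces):
--         if target_no_spaces.startswith("<sent_br>", tgt_idx):
--             # Check for newline in source
--             if src_idx < len(source_no_spaces) and source_no_spaces[src_idx] == "\n":
--                 # Corresponding newline found in source
--                 reconstructed_target.append("\n")
--                 src_idx += 1
--             else:
--                 # No corresponding newline in source, remove <sent_br>
--                 pass
--             tgt_idx += len("<sent_br>")
--         else:
--             if src_idx >= len(source_no_spaces):
--                 # Mismatch: Source ended before target
--                 return False
--             # Append character
--             reconstructed_target.append(target_no_spaces[tgt_idx])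
--             if target_no_spaces[tgt_idx] != source_no_spaces[src_idx]:
--                 # Mismatch between source and target characters
--                 return False
--             src_idx += 1
--             tgt_idx += 1
--
--     # After processing, src_idx should reach the end of source_no_spaces or only have newlines left
--     while src_idx < len(source_no_spaces):
--         if source_no_spaces[src_idx] != "\n":
--             # Extra character in source that's not a newline
--             return False
--         src_idx += 1
--
--     # Reconstruct the processed target string
--     processed_target = "".join(reconstructed_target)
--
--     # Compute Manhattan distance
--     distance = manhattan_distance(source_processed, processed_target)
--     if distance == 0:
--         # Data point is valid
--         return True
--     else:
--         # Data point is invalid due to non-zero Manhattan distance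
--         return False
-- ===== SOURCE B (Python) =====
-- def replace_sentence_breaks_and_validate(data_point):
--     """Segment-wise validation: split target on <sent_br> and walk a single source pointer."""
--     src = data_point["source"].replace(" ", "")
--     tgt = data_point["target"].replace(" ", "")
--
--     def match_segment(i, seg):
--         # advance i through src matching seg char by char; None signals a mismatch
--         for ch in seg:
--             if i is None or i >= len(src) or src[i] != ch:
--                 return None
--             i += 1
--         return i
--
--     segments = tgt.split("<sent_br>")
--     i = match_segment(0, segments[0])
--     for seg in segments[1:]:
--         # at each marker boundary, consume one newline from src if present
--         if i is not None and i < len(src) and src[i] == "\n":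
--             i += 1
--         i = match_segment(i, seg)
--     return i == len(src)
-- ===== Notes on version B (the rewrite author's own statement) =====
-- stated objective: simpler
-- what changed: B splits the space-stripped target on the literal '<sent_br>' and walks the segments with a single source pointer (consuming one newline at each marker boundary), finishing with a pointer-at-end test, instead of A's flat index scan with startswith probes at every position, reconstruction of the target and a final Manhattan-distance comparison.
import Mathlib
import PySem

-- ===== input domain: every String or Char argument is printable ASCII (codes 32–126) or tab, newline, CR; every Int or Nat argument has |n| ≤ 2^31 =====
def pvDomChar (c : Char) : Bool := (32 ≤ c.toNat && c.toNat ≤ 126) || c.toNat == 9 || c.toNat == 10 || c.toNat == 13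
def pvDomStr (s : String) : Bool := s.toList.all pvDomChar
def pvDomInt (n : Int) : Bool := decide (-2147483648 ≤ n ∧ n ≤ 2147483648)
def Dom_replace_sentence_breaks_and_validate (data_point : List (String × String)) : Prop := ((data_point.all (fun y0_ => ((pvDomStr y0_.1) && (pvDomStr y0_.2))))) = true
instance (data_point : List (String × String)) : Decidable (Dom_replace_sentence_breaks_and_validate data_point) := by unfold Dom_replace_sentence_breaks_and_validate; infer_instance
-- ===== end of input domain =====

-- B replaces A's flat index scan + reconstruction + Manhattan-distance check by a segment-wise
-- walk (split target on "<sent_br>", one source pointer); objective: simpler. Return-value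
-- equivalence only (A deep-copies its argument; neither version mutates observably).


-- ===== PORT A =====
-- "<sent_br>" as a char list
def pvMarker : List Char := ['<', 's', 'e', 'n', 't', '_', 'b', 'r', '>']

-- manhattan_distance(str1, str2)
def pvManhattan (s1 s2 : List Char) : Int :=
  if s1.length ≠ s2.length then -1
  else ((s1.zip s2).map (fun p => if p.1 ≠ p.2 then (1 : Int) else 0)).sum

-- A's while loop over the target; tgt_idx is carried as the remaining suffix t of the target,
-- rec is reconstructed_target; none = the loop's early `return False`, some = (rec, src_idx).
def pvA_loop (src : List Char) : List Char → Nat → List Char → Option (List Char × Nat)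
  | [], si, rec => some (rec, si)
  | c :: rest, si, rec =>
    if pvMarker.isPrefixOf (c :: rest) then
      if src[si]? = some '\n' then pvA_loop src ((c :: rest).drop 9) (si + 1) (rec ++ ['\n'])
      else pvA_loop src ((c :: rest).drop 9) si rec
    else
      if src.length ≤ si then none
      else
        if src[si]? ≠ some c then none
        else pvA_loop src rest (si + 1) (rec ++ [c])
  termination_by t => t.length
  decreasing_by all_goals simp [List.length_drop]

-- A's trailing while loop: false = its `return False`
def pvA_trail (src : List Char) (si : Nat) : Bool :=
  if si < src.length then
    if src[si]! ≠ '\n' then false else pvA_trail src (si + 1)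
  else true
  termination_by src.length - si

-- (copy.deepcopy only protects the caller's dict; it does not affect the return value)
def replace_sentence_breaks_and_validate (data_point : List (String × String)) : Bool :=
  let source_no_spaces := PySem.Chars.replace ((PySem.Dict.get? (PySem.Dict.mk data_point) "source").getD "").toList [' '] []
  let target_no_spaces := PySem.Chars.replace ((PySem.Dict.get? (PySem.Dict.mk data_point) "target").getD "").toList [' '] []
  match pvA_loop source_no_spaces target_no_spaces 0 [] with
  | none => false
  | some (reconstructed_target, si) =>
    if pvA_trail source_no_spaces si then
      if pvManhattan source_no_spaces reconstructed_target == 0 then true else false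
    else false

-- ===== PORT B =====
-- match_segment(i, seg): advance i through src matching seg; none signals a mismatch
def pvB_matchSeg (src : List Char) : Option Nat → List Char → Option Nat
  | none, _ => none
  | some i, [] => some i
  | some i, c :: rest => if src[i]? = some c then pvB_matchSeg src (some (i + 1)) rest else none

-- the `for seg in segments[1:]` loop
def pvB_loop (src : List Char) : Option Nat → List (List Char) → Option Nat
  | i, [] => i
  | i, seg :: rest =>
    let i' := match i with
      | some j => if src[j]? = some '\n' then some (j + 1) else some j
      | none => none
    pvB_loop src (pvB_matchSeg src i' seg) rest

def replace_sentence_breaks_and_validate_alt (data_point : List (String × String)) : Bool :=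
  let src := PySem.Chars.replace ((PySem.Dict.get? (PySem.Dict.mk data_point) "source").getD "").toList [' '] []
  let tgt := PySem.Chars.replace ((PySem.Dict.get? (PySem.Dict.mk data_point) "target").getD "").toList [' '] []
  let segments := PySem.Chars.splitOn tgt pvMarker
  let i := pvB_loop src (pvB_matchSeg src (some 0) (segments.headD [])) segments.tail
  decide (i = some src.length)

-- ===== PRECONDITION & SPEC =====
-- Pre_ excludes only the dicts missing a "source" or "target" key, on which A raises KeyError.
def Pre_replace_sentence_breaks_and_validate (data_point : List (String × String)) : Prop :=
  (data_point.any (fun p => p.1 == "source")) = true ∧ (data_point.any (fun p => p.1 == "target")) = true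
instance (data_point : List (String × String)) : Decidable (Pre_replace_sentence_breaks_and_validate data_point) := by unfold Pre_replace_sentence_breaks_and_validate; infer_instance

def pvWitness_replace_sentence_breaks_and_validate : (List (String × String)) :=
  [("source", "ab\ncd"), ("target", "ab<sent_br>cd")]

def Spec_replace_sentence_breaks_and_validate (data_point : List (String × String)) (out : Bool) : Prop := out = replace_sentence_breaks_and_validate_alt data_point
instance (data_point : List (String × String)) (out : Bool) : Decidable (Spec_replace_sentence_breaks_and_validate data_point out) := by unfold Spec_replace_sentence_breaks_and_validate; infer_instance

-- ===== CLAIM (what is proved, stated in full; the proofs are below) =====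
def Claim_equal_replace_sentence_breaks_and_validate : Prop := ∀ (data_point : List (String × String)), Dom_replace_sentence_breaks_and_validate data_point → Pre_replace_sentence_breaks_and_validate data_point → Spec_replace_sentence_breaks_and_validate data_point (replace_sentence_breaks_and_validate data_point)

-- ===== LEMMAS AND PROOFS =====

-- step equations for PySem.Chars.splitOn.go (cited from its eq_def), specialised to pvMarker
theorem go_zero (l cur : List Char) (acc : List (List Char)) :
    PySem.Chars.splitOn.go pvMarker 0 l cur acc = ((cur.reverse ++ l) :: acc).reverse := by
  rw [PySem.Chars.splitOn.go.eq_def]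

theorem go_nil_succ (f : Nat) (cur : List Char) (acc : List (List Char)) :
    PySem.Chars.splitOn.go pvMarker (f + 1) [] cur acc = (cur.reverse :: acc).reverse := by
  rw [PySem.Chars.splitOn.go.eq_def]

theorem go_cons_succ (f : Nat) (c : Char) (rest cur : List Char) (acc : List (List Char)) :
    PySem.Chars.splitOn.go pvMarker (f + 1) (c :: rest) cur acc =
      if pvMarker.isPrefixOf (c :: rest) then
        PySem.Chars.splitOn.go pvMarker f ((c :: rest).drop 9) [] (cur.reverse :: acc)
      else PySem.Chars.splitOn.go pvMarker f rest (c :: cur) acc := by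
  rw [PySem.Chars.splitOn.go.eq_def]; rfl

theorem go_acc (fuel : Nat) : ∀ (l cur : List Char) (acc : List (List Char)),
    PySem.Chars.splitOn.go pvMarker fuel l cur acc =
      acc.reverse ++ PySem.Chars.splitOn.go pvMarker fuel l cur [] := by
  induction fuel with
  | zero => intro l cur acc; simp [go_zero]
  | succ f IH =>
    intro l cur acc
    match l with
    | [] => simp [go_nil_succ]
    | c :: rest =>
      rw [go_cons_succ, go_cons_succ]
      split
      · rw [IH ((c :: rest).drop 9) [] (cur.reverse :: acc), IH ((c :: rest).drop 9) [] [cur.reverse]]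
        simp
      · exact IH rest (c :: cur) acc

theorem go_cur (fuel : Nat) : ∀ (l cur : List Char),
    PySem.Chars.splitOn.go pvMarker fuel l cur [] =
      (PySem.Chars.splitOn.go pvMarker fuel l [] []).modifyHead (cur.reverse ++ ·) := by
  induction fuel with
  | zero => intro l cur; simp [go_zero]
  | succ f IH =>
    intro l cur
    match l with
    | [] => simp [go_nil_succ]
    | c :: rest =>
      rw [go_cons_succ, go_cons_succ]
      split
      · rw [go_acc f ((c :: rest).drop 9) [] [cur.reverse], go_acc f ((c :: rest).drop 9) [] [[].reverse]]
        cases PySem.Chars.splitOn.go pvMarker f ((c :: rest).drop 9) [] [] <;> simp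
      · rw [IH rest (c :: cur), IH rest [c], List.modifyHead_modifyHead]
        cases PySem.Chars.splitOn.go pvMarker f rest [] [] <;> simp

theorem go_fuel (fuel : Nat) : ∀ (fuel' : Nat) (l cur : List Char) (acc : List (List Char)),
    l.length < fuel → l.length < fuel' →
    PySem.Chars.splitOn.go pvMarker fuel l cur acc = PySem.Chars.splitOn.go pvMarker fuel' l cur acc := by
  induction fuel with
  | zero => intro fuel' l cur acc h _; omega
  | succ f IH =>
    intro fuel' l cur acc h h'
    match fuel', l with
    | fuel', [] =>
      match fuel' with
      | 0 => omega
      | f' + 1 => rw [go_nil_succ, go_nil_succ]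
    | 0, c :: rest => omega
    | f' + 1, c :: rest =>
      rw [go_cons_succ, go_cons_succ]
      split
      · exact IH f' _ _ _ (by simp at h ⊢; omega) (by simp at h' ⊢; omega)
      · exact IH f' _ _ _ (by simp at h ⊢; omega) (by simp at h' ⊢; omega)

theorem splitOn_prefix (t : List Char) (h : pvMarker.isPrefixOf t = true) :
    PySem.Chars.splitOn t pvMarker = [] :: PySem.Chars.splitOn (t.drop 9) pvMarker := by
  have hlen : 9 ≤ t.length := by
    have := (List.isPrefixOf_iff_prefix.mp h).length_le
    simpa [pvMarker] using this
  match t with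
  | c :: rest =>
    show PySem.Chars.splitOn.go pvMarker ((c :: rest).length + 1) (c :: rest) [] [] = _
    rw [go_cons_succ, if_pos h, go_acc]
    have h2 : PySem.Chars.splitOn.go pvMarker (c :: rest).length ((c :: rest).drop 9) [] [] =
        PySem.Chars.splitOn.go pvMarker (((c :: rest).drop 9).length + 1) ((c :: rest).drop 9) [] [] := by
      apply go_fuel
      · simp [List.length_drop]
      · omega
    rw [h2]
    rfl

theorem splitOn_cons (c : Char) (rest : List Char) (h : ¬ pvMarker.isPrefixOf (c :: rest) = true) :
    PySem.Chars.splitOn (c :: rest) pvMarker =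
      (PySem.Chars.splitOn rest pvMarker).modifyHead (c :: ·) := by
  show PySem.Chars.splitOn.go pvMarker ((c :: rest).length + 1) (c :: rest) [] [] = _
  rw [go_cons_succ, if_neg h, go_cur]
  rfl

theorem splitOn_ne_nil (t : List Char) : PySem.Chars.splitOn t pvMarker ≠ [] := by
  induction hn : t.length using Nat.strong_induction_on generalizing t with
  | _ n IH =>
    cases t with
    | nil => simp [PySem.Chars.splitOn, go_nil_succ]
    | cons c rest =>
      by_cases h : pvMarker.isPrefixOf (c :: rest) = true
      · rw [splitOn_prefix _ h]; simp
      · rw [splitOn_cons _ _ h]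
        have := IH rest.length (by simp at hn; omega) rest rfl
        cases hs : PySem.Chars.splitOn rest pvMarker <;> simp_all

-- step equations for pvA_loop (from its eq_def)
theorem pvA_nil (src : List Char) (si : Nat) (rec : List Char) :
    pvA_loop src [] si rec = some (rec, si) := by
  rw [pvA_loop.eq_def]

theorem pvA_cons (src : List Char) (c : Char) (rest : List Char) (si : Nat) (rec : List Char) :
    pvA_loop src (c :: rest) si rec =
      if pvMarker.isPrefixOf (c :: rest) then
        if src[si]? = some '\n' then pvA_loop src ((c :: rest).drop 9) (si + 1) (rec ++ ['\n'])
        else pvA_loop src ((c :: rest).drop 9) si rec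
      else
        if src.length ≤ si then none
        else if src[si]? ≠ some c then none
        else pvA_loop src rest (si + 1) (rec ++ [c]) := by
  rw [pvA_loop.eq_def]

theorem pvB_matchSeg_none (src : List Char) (seg : List Char) :
    pvB_matchSeg src none seg = none := by
  cases seg <;> simp [pvB_matchSeg]

-- loop invariant for A: on success the reconstruction is exactly the consumed slice of src
theorem pvA_loop_inv (src : List Char) : ∀ (n : Nat) (t : List Char) (si : Nat) (rec rec' : List Char) (si' : Nat),
    t.length = n → si ≤ src.length →
    pvA_loop src t si rec = some (rec', si') →
    si ≤ si' ∧ si' ≤ src.length ∧ rec' = rec ++ (src.drop si).take (si' - si) := by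
  intro n
  induction n using Nat.strong_induction_on with
  | _ n IH =>
    intro t si rec rec' si' hn hsi h
    cases t with
    | nil =>
      rw [pvA_nil] at h
      have h' := Option.some.inj h
      have h1 : rec = rec' := congrArg Prod.fst h'
      have h2 : si = si' := congrArg Prod.snd h'
      subst h1; subst h2
      simp [hsi]
    | cons c rest =>
      rw [pvA_cons] at h
      by_cases hp : pvMarker.isPrefixOf (c :: rest) = true
      · rw [if_pos hp] at h
        by_cases hnl : src[si]? = some '\n'
        · rw [if_pos hnl] at h
          have hlt : si < src.length := (List.getElem?_eq_some_iff.mp hnl).1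
          obtain ⟨h1, h2, h3⟩ := IH ((c :: rest).drop 9).length (by simp at hn ⊢; omega)
            _ _ _ _ _ rfl (by omega) h
          refine ⟨by omega, h2, ?_⟩
          rw [h3]
          have hd : src.drop si = '\n' :: src.drop (si + 1) := by
            rw [List.drop_eq_getElem_cons hlt]
            have : src[si] = '\n' := by
              have := (List.getElem?_eq_some_iff.mp hnl).2; simpa using this
            rw [this]
          rw [hd]
          have : si' - si = (si' - (si + 1)) + 1 := by omega
          rw [this, List.take_succ_cons]
          simp
        · rw [if_neg hnl] at h
          exact IH ((c :: rest).drop 9).length (by simp at hn ⊢; omega) _ _ _ _ _ rfl hsi h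
      · rw [if_neg hp] at h
        by_cases hb : src.length ≤ si
        · rw [if_pos hb] at h; exact absurd h (by simp)
        · rw [if_neg hb] at h
          by_cases hc : src[si]? = some c
          · rw [if_neg (by simp [hc])] at h
            have hlt : si < src.length := (List.getElem?_eq_some_iff.mp hc).1
            obtain ⟨h1, h2, h3⟩ := IH rest.length (by simp at hn; omega)
              _ _ _ _ _ rfl (by omega) h
            refine ⟨by omega, h2, ?_⟩
            rw [h3]
            have hd : src.drop si = c :: src.drop (si + 1) := by
              rw [List.drop_eq_getElem_cons hlt]
              have : src[si] = c := by
                have := (List.getElem?_eq_some_iff.mp hc).2; simpa using this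
              rw [this]
            rw [hd]
            have : si' - si = (si' - (si + 1)) + 1 := by omega
            rw [this, List.take_succ_cons]
            simp
          · rw [if_pos (by simp [hc])] at h; exact absurd h (by simp)

theorem pvB_loop_none (src : List Char) : ∀ (l : List (List Char)),
    pvB_loop src none l = none := by
  intro l
  induction l with
  | nil => rfl
  | cons seg rest IH => simp [pvB_loop, pvB_matchSeg_none, IH]

-- the segment-wise B walk computes exactly A's final src_idx (or none where A returns early)
theorem pvMain (src : List Char) : ∀ (n : Nat) (t : List Char) (si : Nat) (rec : List Char),
    t.length = n →
    pvB_loop src (pvB_matchSeg src (some si) ((PySem.Chars.splitOn t pvMarker).headD []))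
        (PySem.Chars.splitOn t pvMarker).tail
      = (pvA_loop src t si rec).map Prod.snd := by
  intro n
  induction n using Nat.strong_induction_on with
  | _ n IH =>
    intro t si rec hn
    cases t with
    | nil => simp [PySem.Chars.splitOn, go_nil_succ, pvB_matchSeg, pvB_loop, pvA_nil]
    | cons c rest =>
      by_cases hp : pvMarker.isPrefixOf (c :: rest) = true
      · rw [splitOn_prefix (c :: rest) hp]
        obtain ⟨h, tl, hs⟩ : ∃ h tl, PySem.Chars.splitOn ((c :: rest).drop 9) pvMarker = h :: tl := by
          cases hx : PySem.Chars.splitOn ((c :: rest).drop 9) pvMarker with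
          | nil => exact absurd hx (splitOn_ne_nil _)
          | cons a b => exact ⟨a, b, rfl⟩
        rw [hs]
        simp only [List.headD_cons, List.tail_cons, pvB_matchSeg, pvB_loop]
        rw [pvA_cons, if_pos hp]
        by_cases hnl : src[si]? = some '\n'
        · rw [if_pos hnl]
          simp only [hnl]
          have := IH ((c :: rest).drop 9).length (by simp at hn ⊢; omega) ((c :: rest).drop 9)
            (si + 1) (rec ++ ['\n']) rfl
          rw [hs] at this
          simpa using this
        · rw [if_neg hnl]
          simp only [if_neg hnl]
          have := IH ((c :: rest).drop 9).length (by simp at hn ⊢; omega) ((c :: rest).drop 9)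
            si rec rfl
          rw [hs] at this
          simpa using this
      · rw [splitOn_cons c rest hp]
        obtain ⟨h, tl, hs⟩ : ∃ h tl, PySem.Chars.splitOn rest pvMarker = h :: tl := by
          cases hx : PySem.Chars.splitOn rest pvMarker with
          | nil => exact absurd hx (splitOn_ne_nil _)
          | cons a b => exact ⟨a, b, rfl⟩
        rw [hs]
        simp only [List.modifyHead_cons, List.headD_cons, List.tail_cons]
        rw [pvA_cons, if_neg hp]
        by_cases hc : src[si]? = some c
        · have hm : pvB_matchSeg src (some si) (c :: h) = pvB_matchSeg src (some (si + 1)) h := by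
            simp [pvB_matchSeg, hc]
          rw [hm]
          have hlt : si < src.length := (List.getElem?_eq_some_iff.mp hc).1
          rw [if_neg (Nat.not_le.mpr hlt), if_neg (by simp [hc])]
          have := IH rest.length (by simp at hn; omega) rest (si + 1) (rec ++ [c]) rfl
          rw [hs] at this
          simpa using this
        · have hm : pvB_matchSeg src (some si) (c :: h) = none := by
            simp [pvB_matchSeg, hc]
          rw [hm, pvB_loop_none]
          by_cases hb : src.length ≤ si
          · rw [if_pos hb]; rfl
          · rw [if_neg hb, if_pos (by simp [hc])]; rfl

theorem pvManhattan_zip_self (s : List Char) :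
    (List.map (fun p : Char × Char => if p.1 = p.2 then (0 : Int) else 1) (s.zip s)).sum = 0 := by
  induction s with
  | nil => rfl
  | cons a t IH => simpa using IH

theorem pvManhattan_self (s : List Char) : pvManhattan s s = 0 := by
  simp [pvManhattan, pvManhattan_zip_self]

theorem pvA_trail_end (src : List Char) : pvA_trail src src.length = true := by
  rw [pvA_trail]
  simp

-- ===== VERDICT (by name: the statement is the Claim_ definition above) =====
-- the whole of A's post-processing (trailing scan + Manhattan check) equals B's final test
theorem pvBridge (src tgt : List Char) :
    (match pvA_loop src tgt 0 [] with
     | none => false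
     | some (rec, si) =>
        if pvA_trail src si then (if pvManhattan src rec == 0 then true else false) else false)
    = decide ((pvB_loop src (pvB_matchSeg src (some 0) ((PySem.Chars.splitOn tgt pvMarker).headD []))
        (PySem.Chars.splitOn tgt pvMarker).tail) = some src.length) := by
  rw [pvMain src tgt.length tgt 0 [] rfl]
  cases hA : pvA_loop src tgt 0 [] with
  | none => simp
  | some p =>
    obtain ⟨rec, si⟩ := p
    obtain ⟨h1, h2, h3⟩ := pvA_loop_inv src tgt.length tgt 0 [] rec si rfl (by omega) hA
    simp only [List.drop_zero, Nat.sub_zero, List.nil_append] at h3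
    by_cases he : si = src.length
    · subst he
      rw [List.take_length] at h3
      subst h3
      simp [pvA_trail_end, pvManhattan_self]
    · have hlen : rec.length = si := by rw [h3]; simp [List.length_take]; omega
      have hmd : pvManhattan src rec = -1 := by
        rw [pvManhattan, if_pos (by omega)]
      simp only [Option.map_some, hmd]
      cases pvA_trail src si <;> simp [he]

-- ===== VERDICT (continued) =====
theorem replace_sentence_breaks_and_validate_spec : Claim_equal_replace_sentence_breaks_and_validate := by
  intro data_point _ _
  unfold Spec_replace_sentence_breaks_and_validate
  unfold replace_sentence_breaks_and_validate replace_sentence_breaks_and_validate_alt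
  exact pvBridge _ _
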